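-- pv_equiv track=rewrite | github.com/Locnar68/island-realty-v4 | app/email_processor_phase4.py | detect_status_from_email
-- ===== SOURCE A (Python) =====
-- STATUS_TRIGGERS = {
--     'Active': [
--         'back on market',
--         'back on the market',
--         'active',
--         'new listing',
--         'just listed'
--     ],
--     'Price Reduction': [
--         'price reduction',
--         'price reduced',
--         'price drop',
--         'reduced price',
--         'price change',
--         'new list price'
--     ],
--     'Highest & Best': [
--         'highest and best',
--         'highest & best',
--         'multiple offer',
--         'best and final',
--         'h&b'
--     ],
--     'Pending': [
--         'pending',
--         'under contract',
--         'in contract',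
--         'accepted offer'
--     ],
--     'Sold': [
--         'sold',
--         'closed',
--         'sale complete'
--     ],
--     'T-O-T-M': [
--         'temporarily off',
--         'temporarily off the market',
--         'temp off',
--         'totm',
--         't-o-t-m',
--         'temporarily withdrawn'
--     ],
--     'Hold': [
--         'on hold',
--         'listing hold',
--         'hold status',
--         'status: hold',
--         'placing hold'
--     ]
-- }
--
-- def detect_status_from_email(subject, body):
--     """
--     Detect property status from email subject and body
--     Returns the detected status or 'Active' as default
--     """
--     # Combine subject and body for searching
--     search_text = (subject + ' ' + body).lower()
--
--     # Priority order for status detection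
--     # (More specific statuses checked first)
--     priority_order = [
--         'Sold',
--         'Pending',
--         'Highest & Best',
--         'Hold',
--         'T-O-T-M',
--         'Price Reduction',
--         'Active'
--     ]
--
--     for status in priority_order:
--         triggers = STATUS_TRIGGERS.get(status, [])
--         for trigger in triggers:
--             if trigger.lower() in search_text:
--                 return status
--
--     # Default to Active if no status detected
--     return 'Active'
-- ===== SOURCE B (Python) =====
-- STATUS_TRIGGERS = {
--     'Active': [
--         'back on market',
--         'back on the market',
--         'active',
--         'new listing',
--         'just listed'
--     ],
--     'Price Reduction': [
--         'price reduction',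
--         'price reduced',
--         'price drop',
--         'reduced price',
--         'price change',
--         'new list price'
--     ],
--     'Highest & Best': [
--         'highest and best',
--         'highest & best',
--         'multiple offer',
--         'best and final',
--         'h&b'
--     ],
--     'Pending': [
--         'pending',
--         'under contract',
--         'in contract',
--         'accepted offer'
--     ],
--     'Sold': [
--         'sold',
--         'closed',
--         'sale complete'
--     ],
--     'T-O-T-M': [
--         'temporarily off',
--         'temporarily off the market',
--         'temp off',
--         'totm',
--         't-o-t-m',
--         'temporarily withdrawn'
--     ],
--     'Hold': [
--         'on hold',
--         'listing hold',
--         'hold status',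
--         'status: hold',
--         'placing hold'
--     ]
-- }
--
-- _PRIORITY_ORDER = ['Sold', 'Pending', 'Highest & Best', 'Hold',
--                    'T-O-T-M', 'Price Reduction', 'Active']
--
--
-- def detect_status_from_email(subject, body):
--     """Detect-all-then-resolve: first collect every status whose trigger
--     list matches the text, then resolve by the fixed priority order."""
--     search_text = (subject + ' ' + body).lower()
--     matched = {status for status, triggers in STATUS_TRIGGERS.items()
--                if any(t.lower() in search_text for t in triggers)}
--     return next((s for s in _PRIORITY_ORDER if s in matched), 'Active')
-- ===== Notes on version B (the rewrite author's own statement) =====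
-- stated objective: alternative
-- what changed: Replaces the short-circuiting priority-ordered nested scan with a two-phase decomposition: one pass collects the set of all statuses whose triggers occur in the text, then a separate pass over the fixed priority order resolves the first matched one.
import Mathlib
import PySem

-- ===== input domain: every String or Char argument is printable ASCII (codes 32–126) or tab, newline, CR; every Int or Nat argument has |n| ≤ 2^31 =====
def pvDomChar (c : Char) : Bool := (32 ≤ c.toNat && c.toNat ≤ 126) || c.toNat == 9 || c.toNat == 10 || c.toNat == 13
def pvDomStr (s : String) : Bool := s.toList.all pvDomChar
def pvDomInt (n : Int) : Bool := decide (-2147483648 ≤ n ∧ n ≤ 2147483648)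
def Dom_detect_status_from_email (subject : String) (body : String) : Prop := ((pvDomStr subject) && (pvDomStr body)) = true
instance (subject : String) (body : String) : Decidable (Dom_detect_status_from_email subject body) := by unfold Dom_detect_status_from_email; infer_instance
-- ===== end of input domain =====

-- B replaces A's short-circuiting priority-ordered nested scan by a two-phase
-- detect-all-then-resolve-by-priority decomposition (objective: alternative).

-- shared module constant STATUS_TRIGGERS
def pvStatusTriggers : PySem.Dict String (List String) :=
  PySem.Dict.mk [
    ("Active", ["back on market", "back on the market", "active", "new listing", "just listed"]),
    ("Price Reduction", ["price reduction", "price reduced", "price drop", "reduced price", "price change", "new list price"]),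
    ("Highest & Best", ["highest and best", "highest & best", "multiple offer", "best and final", "h&b"]),
    ("Pending", ["pending", "under contract", "in contract", "accepted offer"]),
    ("Sold", ["sold", "closed", "sale complete"]),
    ("T-O-T-M", ["temporarily off", "temporarily off the market", "temp off", "totm", "t-o-t-m", "temporarily withdrawn"]),
    ("Hold", ["on hold", "listing hold", "hold status", "status: hold", "placing hold"])]

-- ===== PORT A =====
-- A's inner 'for trigger in triggers: if …: return status' loop
def pvScanTriggers (search_text : String) : List String → Bool
  | [] => false
  | t :: ts =>
      if PySem.Str.isIn (PySem.Str.lower t) search_text then true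
      else pvScanTriggers search_text ts

-- A's outer 'for status in priority_order' loop (returns 'Active' when it falls through)
def pvScanPriority (search_text : String) : List String → String
  | [] => "Active"
  | s :: rest =>
      if pvScanTriggers search_text (pvStatusTriggers.getD s []) then s
      else pvScanPriority search_text rest

def detect_status_from_email (subject : String) (body : String) : String :=
  let search_text := PySem.Str.lower (subject ++ " " ++ body)
  let priority_order := ["Sold", "Pending", "Highest & Best", "Hold", "T-O-T-M", "Price Reduction", "Active"]
  pvScanPriority search_text priority_order

-- ===== PORT B =====
def pvPriorityOrder : List String :=
  ["Sold", "Pending", "Highest & Best", "Hold", "T-O-T-M", "Price Reduction", "Active"]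

def detect_status_from_email_alt (subject : String) (body : String) : String :=
  let search_text := PySem.Str.lower (subject ++ " " ++ body)
  let matched : PySem.Set String :=
    PySem.Set.ofList ((pvStatusTriggers.items.filter
      (fun p => p.2.any (fun t => PySem.Str.isIn (PySem.Str.lower t) search_text))).map (·.1))
  match pvPriorityOrder.find? (fun s => PySem.Set.contains matched s) with
  | some s => s
  | none => "Active"

-- ===== PRECONDITION & SPEC =====
def Spec_detect_status_from_email (subject : String) (body : String) (out : String) : Prop := out = detect_status_from_email_alt subject body
instance (subject : String) (body : String) (out : String) : Decidable (Spec_detect_status_from_email subject body out) := by unfold Spec_detect_status_from_email; infer_instance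

-- ===== CLAIM (what is proved, stated in full; the proofs are below) =====
def Claim_equal_detect_status_from_email : Prop := ∀ (subject : String) (body : String), Dom_detect_status_from_email subject body → Spec_detect_status_from_email subject body (detect_status_from_email subject body)

-- ===== LEMMAS AND PROOFS =====

-- A's short-circuiting inner loop is the any-fold B's comprehension uses
theorem pvScanTriggers_eq_any (search_text : String) (ts : List String) :
    pvScanTriggers search_text ts
      = ts.any (fun t => PySem.Str.isIn (PySem.Str.lower t) search_text) := by
  induction ts with
  | nil => rfl
  | cons t ts ih =>
      rw [pvScanTriggers, ih]
      cases h : PySem.Str.isIn (PySem.Str.lower t) search_text <;>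
        simp only [h, List.any_cons, Bool.false_eq_true, if_false, if_true,
                   Bool.false_or, Bool.true_or]

theorem pvCore (search_text : String) :
    pvScanPriority search_text
        ["Sold", "Pending", "Highest & Best", "Hold", "T-O-T-M", "Price Reduction", "Active"]
      = (match pvPriorityOrder.find? (fun s =>
            PySem.Set.contains (PySem.Set.ofList ((pvStatusTriggers.items.filter
              (fun p => p.2.any (fun t => PySem.Str.isIn (PySem.Str.lower t) search_text))).map (·.1))) s) with
         | some s => s
         | none => "Active") := by
  have e1 : pvStatusTriggers.getD "Sold" [] = ["sold", "closed", "sale complete"] := rfl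
  have e2 : pvStatusTriggers.getD "Pending" [] = ["pending", "under contract", "in contract", "accepted offer"] := rfl
  have e3 : pvStatusTriggers.getD "Highest & Best" [] = ["highest and best", "highest & best", "multiple offer", "best and final", "h&b"] := rfl
  have e4 : pvStatusTriggers.getD "Hold" [] = ["on hold", "listing hold", "hold status", "status: hold", "placing hold"] := rfl
  have e5 : pvStatusTriggers.getD "T-O-T-M" [] = ["temporarily off", "temporarily off the market", "temp off", "totm", "t-o-t-m", "temporarily withdrawn"] := rfl
  have e6 : pvStatusTriggers.getD "Price Reduction" [] = ["price reduction", "price reduced", "price drop", "reduced price", "price change", "new list price"] := rfl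
  have e7 : pvStatusTriggers.getD "Active" [] = ["back on market", "back on the market", "active", "new listing", "just listed"] := rfl
  have ei : pvStatusTriggers.items = [
    ("Active", ["back on market", "back on the market", "active", "new listing", "just listed"]),
    ("Price Reduction", ["price reduction", "price reduced", "price drop", "reduced price", "price change", "new list price"]),
    ("Highest & Best", ["highest and best", "highest & best", "multiple offer", "best and final", "h&b"]),
    ("Pending", ["pending", "under contract", "in contract", "accepted offer"]),
    ("Sold", ["sold", "closed", "sale complete"]),
    ("T-O-T-M", ["temporarily off", "temporarily off the market", "temp off", "totm", "t-o-t-m", "temporarily withdrawn"]),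
    ("Hold", ["on hold", "listing hold", "hold status", "status: hold", "placing hold"])] := rfl
  cases h1 : (["sold", "closed", "sale complete"].any (fun t => PySem.Str.isIn (PySem.Str.lower t) search_text)) <;>
  cases h2 : (["pending", "under contract", "in contract", "accepted offer"].any (fun t => PySem.Str.isIn (PySem.Str.lower t) search_text)) <;>
  cases h3 : (["highest and best", "highest & best", "multiple offer", "best and final", "h&b"].any (fun t => PySem.Str.isIn (PySem.Str.lower t) search_text)) <;>
  cases h4 : (["on hold", "listing hold", "hold status", "status: hold", "placing hold"].any (fun t => PySem.Str.isIn (PySem.Str.lower t) search_text)) <;>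
  cases h5 : (["temporarily off", "temporarily off the market", "temp off", "totm", "t-o-t-m", "temporarily withdrawn"].any (fun t => PySem.Str.isIn (PySem.Str.lower t) search_text)) <;>
  cases h6 : (["price reduction", "price reduced", "price drop", "reduced price", "price change", "new list price"].any (fun t => PySem.Str.isIn (PySem.Str.lower t) search_text)) <;>
  cases h7 : (["back on market", "back on the market", "active", "new listing", "just listed"].any (fun t => PySem.Str.isIn (PySem.Str.lower t) search_text)) <;>
  simp only [pvScanPriority, pvScanTriggers_eq_any, e1, e2, e3, e4, e5, e6, e7, ei,
             List.filter_cons, List.filter_nil, h1, h2, h3, h4, h5, h6, h7,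
             Bool.false_eq_true, if_true, if_false,] <;>
  rfl

-- ===== VERDICT (by name: the statement is the Claim_ definition above) =====
theorem detect_status_from_email_spec : Claim_equal_detect_status_from_email := by
  intro subject body _
  unfold Spec_detect_status_from_email detect_status_from_email detect_status_from_email_alt
  exact pvCore (PySem.Str.lower (subject ++ " " ++ body))
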